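-- pv_equiv track=rewrite | github.com/enzo-project/enzo-e | tools/l1_error_norm.py | vector_name_iterator
-- ===== SOURCE A (Python) =====
-- def vector_name_iterator(data):
--     """
--     Produces an iterator that yields 2-tuples of vectors given a dict of fields
--
--     vectors are identified by identifying fields with common prefixes that all
--     end with '_x', '_y', or '_z'.
--
--     The first element of the yielded tuple holds the common prefix of the
--     fields related to the vector, while the second element holds a list of
--     field names corresponding to the various components (orderred as x,y,z).
--     Missing components are replaced by a None
--     """
--
--     ax_map = {'x' : 0, 'y' : 1, 'z' : 2}
--     candidates = {}
--     # identify candidate vectors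
--     for elem in data.keys():
--         temp = elem.split('_')
--         if len(temp) != 2 or (temp[1] not in ['x','y','z']):
--             continue
--         prefix, dim = temp
--         if prefix not in candidates:
--             candidates[prefix] = [None, None, None]
--         candidates[prefix][ax_map[dim]] = elem
--     return candidates.items()
-- ===== SOURCE B (Python) =====
-- def vector_name_iterator(data):
--     # Flat pipeline: classify keys into (prefix, axis, key) triples, dedupe
--     # prefixes in first-seen order, then assemble each row by a backward search.
--     trips = [(t[0], t[1], k)
--              for k, t in ((k, k.split('_')) for k in data)
--              if len(t) == 2 and t[1] in ('x', 'y', 'z')]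
--
--     def last(p, d):
--         for q, e, k in reversed(trips):
--             if q == p and e == d:
--                 return k
--         return None
--
--     prefixes = dict.fromkeys(p for p, _, _ in trips)
--     return {p: [last(p, 'x'), last(p, 'y'), last(p, 'z')] for p in prefixes}.items()
-- ===== Notes on version B (the rewrite author's own statement) =====
-- stated objective: alternative
-- what changed: Replaces the incremental dict of mutable 3-slot rows with a flat pipeline: classify keys into (prefix, axis, key) triples, dedupe prefixes in first-seen order, then build each row by a backward search over the triples.
import Mathlib
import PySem

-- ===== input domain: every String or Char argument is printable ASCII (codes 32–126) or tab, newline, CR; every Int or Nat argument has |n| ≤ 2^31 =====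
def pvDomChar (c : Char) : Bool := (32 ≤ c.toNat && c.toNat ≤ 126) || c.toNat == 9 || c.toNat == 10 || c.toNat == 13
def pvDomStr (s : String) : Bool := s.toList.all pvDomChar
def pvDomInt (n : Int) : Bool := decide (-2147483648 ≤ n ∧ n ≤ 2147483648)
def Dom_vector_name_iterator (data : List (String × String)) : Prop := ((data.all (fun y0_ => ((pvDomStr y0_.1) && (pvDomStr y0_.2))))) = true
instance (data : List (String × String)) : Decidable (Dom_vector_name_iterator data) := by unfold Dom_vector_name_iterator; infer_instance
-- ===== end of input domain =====

-- B groups fields into vectors via a flat triple list + per-cell backward search instead of A's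
-- incrementally mutated dict of rows ('alternative'; return-value equivalence, no speed claim).

-- ===== PORT A =====
def vna_step (cand : PySem.Dict String (List (Option String))) (elem : String) :
    PySem.Dict String (List (Option String)) :=
  let temp := (PySem.Str.split? elem "_").getD []
  match temp with
  | [pre, dim] =>
    if dim ∈ (["x", "y", "z"] : List String) then
      let idx : Nat := (PySem.Dict.ofList [("x", 0), ("y", 1), ("z", 2)]).getD dim 0
      let cand2 := if cand.contains pre then cand else cand.insert pre [none, none, none]
      cand2.insert pre ((cand2.getD pre [none, none, none]).set idx (some elem))
    else cand
  | _ => cand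

def vector_name_iterator (data : List (String × String)) : List (String × List (Option String)) :=
  (((PySem.Dict.ofList data).keys).foldl vna_step PySem.Dict.empty).items

-- ===== PORT B =====
def vna_trip (k : String) : Option (String × String × String) :=
  match (PySem.Str.split? k "_").getD [] with
  | [p, d] => if d ∈ (["x", "y", "z"] : List String) then some (p, d, k) else none
  | _ => none

def vna_last (trips : List (String × String × String)) (p d : String) : Option String :=
  (trips.reverse.find? (fun t => t.1 == p && t.2.1 == d)).map (fun t => t.2.2)

def vector_name_iterator_alt (data : List (String × String)) : List (String × List (Option String)) :=
  let trips := ((PySem.Dict.ofList data).keys).filterMap vna_trip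
  let prefixes := PySem.List.dedup (trips.map (·.1))
  prefixes.map (fun p => (p, [vna_last trips p "x", vna_last trips p "y", vna_last trips p "z"]))

-- ===== PRECONDITION & SPEC =====
def Spec_vector_name_iterator (data : List (String × String)) (out : List (String × List (Option String))) : Prop := out = vector_name_iterator_alt data
instance (data : List (String × String)) (out : List (String × List (Option String))) : Decidable (Spec_vector_name_iterator data out) := by unfold Spec_vector_name_iterator; infer_instance

-- ===== CLAIM (what is proved, stated in full; the proofs are below) =====
def Claim_equal_vector_name_iterator : Prop := ∀ (data : List (String × String)), Dom_vector_name_iterator data → Spec_vector_name_iterator data (vector_name_iterator data)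


-- ===== LEMMAS AND PROOFS =====

theorem vna_step_of_trip_none (D : PySem.Dict String (List (Option String))) (k : String)
    (h : vna_trip k = none) : vna_step D k = D := by
  unfold vna_trip at h
  unfold vna_step
  cases htemp : (PySem.Str.split? k "_").getD [] with
  | nil => rfl
  | cons a t =>
    cases t with
    | nil => rfl
    | cons b t2 =>
      cases t2 with
      | nil =>
        rw [htemp] at h
        simp only []
        split
        · simp_all
        · rfl
      | cons c t3 => rfl

theorem vna_trip_some {k p d k' : String} (h : vna_trip k = some (p, d, k')) :
    k' = k ∧ (PySem.Str.split? k "_").getD [] = [p, d] ∧ d ∈ (["x", "y", "z"] : List String) := by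
  unfold vna_trip at h
  cases htemp : (PySem.Str.split? k "_").getD [] with
  | nil => rw [htemp] at h; simp_all
  | cons a t =>
    cases t with
    | nil => rw [htemp] at h; simp_all
    | cons b t2 =>
      cases t2 with
      | nil =>
        rw [htemp] at h
        split at h
        · rename_i pre dim heq
          split at h
          next hax =>
            simp only [Option.some.injEq, Prod.mk.injEq] at h
            obtain ⟨rfl, rfl, rfl⟩ := h
            exact ⟨rfl, heq, hax⟩
          next => exact absurd h (by simp)
        · rename_i hcon
          exact absurd rfl (hcon a b)
      | cons c t3 => rw [htemp] at h; simp_all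

theorem vna_step_some (D : PySem.Dict String (List (Option String))) {k p d : String}
    (h : vna_trip k = some (p, d, k)) :
    vna_step D k =
      (if D.contains p then D else D.insert p [none, none, none]).insert p
        (((if D.contains p then D else D.insert p [none, none, none]).getD p [none, none, none]).set
          ((PySem.Dict.ofList [("x", 0), ("y", 1), ("z", 2)]).getD d 0) (some k)) := by
  obtain ⟨-, h2, h3⟩ := vna_trip_some h
  unfold vna_step
  rw [h2]
  simp [h3]

theorem getD_not_contains (D : PySem.Dict String (List (Option String))) (p : String)
    (h : D.contains p = false) : D.getD p [none, none, none] = [none, none, none] := by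
  have := (PySem.Dict.get?_eq_none_iff_contains D p).mpr h
  simp [PySem.Dict.getD, this]

theorem keys_step_some (D : PySem.Dict String (List (Option String))) {k p d : String}
    (h : vna_trip k = some (p, d, k)) :
    (vna_step D k).keys = if p ∈ D.keys then D.keys else D.keys ++ [p] := by
  rw [vna_step_some D h]
  cases hc : D.contains p with
  | true =>
    rw [if_pos rfl]
    rw [PySem.Dict.keys_insert_of_contains D _ hc]
    rw [PySem.Dict.contains_eq_decide_mem_keys] at hc
    simp at hc
    simp [hc]
  | false =>
    rw [if_neg (Bool.false_ne_true)]
    have h1 : (D.insert p ([none, none, none] : List (Option String))).contains p = true :=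
      PySem.Dict.contains_insert_self D p _
    rw [PySem.Dict.keys_insert_of_contains _ _ h1]
    rw [PySem.Dict.keys_insert_of_not_contains D _ hc]
    rw [PySem.Dict.contains_eq_decide_mem_keys] at hc
    simp at hc
    simp [hc]

theorem getD_step_some (D : PySem.Dict String (List (Option String))) {k p d : String}
    (h : vna_trip k = some (p, d, k)) (q : String) :
    (vna_step D k).getD q [none, none, none] =
      if q = p then
        (D.getD p [none, none, none]).set
          ((PySem.Dict.ofList [("x", 0), ("y", 1), ("z", 2)]).getD d 0) (some k)
      else D.getD q [none, none, none] := by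
  rw [vna_step_some D h]
  rw [PySem.Dict.getD_insert]
  cases hc : D.contains p with
  | true => rw [if_pos rfl]
  | false =>
    rw [if_neg (Bool.false_ne_true)]
    rw [PySem.Dict.getD_insert]
    by_cases hq : q = p
    · subst hq
      simp [getD_not_contains D q hc]
    · rw [PySem.Dict.getD_insert]
      simp [hq]

theorem vna_last_append (T : List (String × String × String)) (p d k q a : String) :
    vna_last (T ++ [(p, d, k)]) q a =
      if p = q ∧ d = a then some k else vna_last T q a := by
  unfold vna_last
  rw [List.reverse_append]
  simp only [List.reverse_singleton, List.singleton_append, List.find?_cons]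
  by_cases hm : p = q ∧ d = a
  · obtain ⟨h1, h2⟩ := hm
    simp [h1, h2]
  · have : ((p == q) && (d == a)) = false := by
      rcases not_and_or.mp hm with h | h <;> simp [h]
    simp [this, hm]

theorem keys_fold (l : List String) :
    ((l.foldl vna_step PySem.Dict.empty).keys)
      = PySem.List.dedup ((l.filterMap vna_trip).map (·.1)) := by
  induction l using List.reverseRecOn with
  | nil => simp [PySem.Dict.keys_empty, PySem.List.dedup, PySem.Set.ofList]
  | append_singleton l k ih =>
    rw [List.foldl_append, List.filterMap_append]
    simp only [List.foldl_cons, List.foldl_nil, List.filterMap_cons, List.filterMap_nil]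
    cases htrip : vna_trip k with
    | none =>
      rw [vna_step_of_trip_none _ _ htrip]
      simpa using ih
    | some t =>
      obtain ⟨p, d, k'⟩ := t
      have hk : k' = k := (vna_trip_some htrip).1
      subst hk
      rw [keys_step_some _ htrip, ih]
      rw [List.map_append]
      have hded : PySem.List.dedup ((l.filterMap vna_trip).map (·.1) ++ [p])
          = PySem.Set.add (PySem.List.dedup ((l.filterMap vna_trip).map (·.1))) p := by
        simp [PySem.List.dedup, PySem.Set.ofList]
      simp only [List.map_cons, List.map_nil] at *
      rw [hded]
      simp only [PySem.Set.add, PySem.Set.contains, List.contains_iff_mem]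

theorem getD_fold (l : List String) (q : String) :
    ((l.foldl vna_step PySem.Dict.empty).getD q [none, none, none])
      = [vna_last (l.filterMap vna_trip) q "x",
         vna_last (l.filterMap vna_trip) q "y",
         vna_last (l.filterMap vna_trip) q "z"] := by
  induction l using List.reverseRecOn with
  | nil => simp [PySem.Dict.getD_empty, vna_last]
  | append_singleton l k ih =>
    rw [List.foldl_append, List.filterMap_append]
    simp only [List.foldl_cons, List.foldl_nil, List.filterMap_cons, List.filterMap_nil]
    cases htrip : vna_trip k with
    | none =>
      rw [vna_step_of_trip_none _ _ htrip]
      simpa using ih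
    | some t =>
      obtain ⟨p, d, k'⟩ := t
      have hk : k' = k := (vna_trip_some htrip).1
      subst hk
      have hd : d ∈ (["x", "y", "z"] : List String) := (vna_trip_some htrip).2.2
      rw [getD_step_some _ htrip q]
      rw [vna_last_append, vna_last_append, vna_last_append]
      by_cases hq : q = p
      · subst hq
        rw [if_pos rfl, ih]
        simp only [List.mem_cons, List.not_mem_nil, or_false] at hd
        rcases hd with rfl | rfl | rfl
        · rw [show (PySem.Dict.ofList [("x", (0:Nat)), ("y", 1), ("z", 2)]).getD "x" 0 = 0 from by decide]
          simp
        · rw [show (PySem.Dict.ofList [("x", (0:Nat)), ("y", 1), ("z", 2)]).getD "y" 0 = 1 from by decide]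
          simp
        · rw [show (PySem.Dict.ofList [("x", (0:Nat)), ("y", 1), ("z", 2)]).getD "z" 0 = 2 from by decide]
          simp
      · rw [if_neg hq, ih]
        have : ¬ p = q := fun hh => hq hh.symm
        simp [this]

-- ===== VERDICT (by name: the statement is the Claim_ definition above) =====
theorem vector_name_iterator_spec : Claim_equal_vector_name_iterator := by
  intro data _
  unfold Spec_vector_name_iterator vector_name_iterator vector_name_iterator_alt
  have hkeys := keys_fold ((PySem.Dict.ofList data).keys)
  have hnd : (((PySem.Dict.ofList data).keys).foldl vna_step PySem.Dict.empty).keys.Nodup := by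
    rw [hkeys]; exact PySem.List.nodup_dedup _
  rw [PySem.Dict.items_eq_map_keys _ hnd [none, none, none], hkeys]
  refine List.map_congr_left ?_
  intro p _
  rw [getD_fold]
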